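-- pv_equiv track=rewrite | github.com/xenophony/the-brain | scripts/analyze_logprob_sweep.py | generate_verification_command
-- ===== SOURCE A (Python) =====
-- def generate_verification_command(analysis: dict, model_path: str) -> str:
--     """Generate the run_sweep.py command for targeted generation verification."""
--     configs = analysis["target_configs"]
--     if not configs:
--         return "# No target configs found"
--
--     # For now, the sweep runner doesn't support arbitrary config lists.
--     # Find the bounding box and suggest a constrained sweep.
--     min_i = min(c[0] for c in configs)
--     max_j = max(c[1] for c in configs)
--
--     return (
--         f"# Generation verification on {len(configs)} target configs\n"
--         f"# Bounding box: i=[{min_i},{max(c[0] for c in configs)}], "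
--         f"j=[{min(c[1] for c in configs)},{max_j}]\n"
--         f"#\n"
--         f"# Option 1: Run full generation probes on the interesting region\n"
--         f"python scripts/run_sweep.py \\\n"
--         f"  --model {model_path} \\\n"
--         f"  --probes eq language spatial_pong_simple spatial_pong_strategic \\\n"
--         f"  --mode duplicate \\\n"
--         f"  --max-layers {max_j + 1} \\\n"
--         f"  --output results/generation_verification\n"
--         f"#\n"
--         f"# Option 2: For targeted configs, use Python directly:\n"
--         f"# from scripts.analyze_logprob_sweep import load_targets\n"
--         f"# configs = load_targets('results/targeted_configs.json')\n"
--     )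
-- ===== SOURCE B (Python) =====
-- def generate_verification_command(analysis: dict, model_path: str) -> str:
--     """Generate the run_sweep.py command for targeted generation verification."""
--     configs = analysis["target_configs"]
--     if not configs:
--         return "# No target configs found"
--
--     # Sort each coordinate list once; extrema are the ends of the sorted lists.
--     si = sorted(c[0] for c in configs)
--     sj = sorted(c[1] for c in configs)
--     min_i, max_i = si[0], si[-1]
--     min_j, max_j = sj[0], sj[-1]
--
--     lines = [
--         f"# Generation verification on {len(configs)} target configs",
--         f"# Bounding box: i=[{min_i},{max_i}], j=[{min_j},{max_j}]",
--         "#",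
--         "# Option 1: Run full generation probes on the interesting region",
--         "python scripts/run_sweep.py \\",
--         f"  --model {model_path} \\",
--         "  --probes eq language spatial_pong_simple spatial_pong_strategic \\",
--         "  --mode duplicate \\",
--         f"  --max-layers {max_j + 1} \\",
--         "  --output results/generation_verification",
--         "#",
--         "# Option 2: For targeted configs, use Python directly:",
--         "# from scripts.analyze_logprob_sweep import load_targets",
--         "# configs = load_targets('results/targeted_configs.json')",
--         "",
--     ]
--     return "\n".join(lines)
-- ===== Notes on version B (the rewrite author's own statement) =====
-- stated objective: alternative
-- what changed: B sorts the i-coordinates and the j-coordinates once each and reads all four extrema from the ends of the sorted lists (sort-based selection instead of A's four min/max scans), and assembles the output as a list of lines joined with '\n' instead of one concatenated f-string.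
import Mathlib
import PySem

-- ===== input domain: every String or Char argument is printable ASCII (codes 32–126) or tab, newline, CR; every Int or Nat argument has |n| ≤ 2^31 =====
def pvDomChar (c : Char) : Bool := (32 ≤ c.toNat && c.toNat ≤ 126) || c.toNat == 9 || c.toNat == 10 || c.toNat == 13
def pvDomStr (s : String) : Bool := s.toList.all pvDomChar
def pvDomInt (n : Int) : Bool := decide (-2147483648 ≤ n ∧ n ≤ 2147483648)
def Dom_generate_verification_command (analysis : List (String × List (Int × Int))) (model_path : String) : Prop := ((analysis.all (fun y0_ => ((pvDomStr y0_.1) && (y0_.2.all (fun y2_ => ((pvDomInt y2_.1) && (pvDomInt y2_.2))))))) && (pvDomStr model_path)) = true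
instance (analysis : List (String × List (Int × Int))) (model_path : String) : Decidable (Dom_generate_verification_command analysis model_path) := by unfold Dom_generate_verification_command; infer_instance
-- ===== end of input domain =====

-- B sorts each coordinate list once and reads the four bounding-box extrema from the ends of
-- the sorted lists (sort-based selection instead of A's four min/max scans), and assembles the
-- output as lines joined by "\n"; byte-identical output. Objective: alternative decomposition.


-- ===== PORT A =====
-- analysis["target_configs"]: KeyError (key absent) is excluded by Pre_; the total form .getD [] is never reached under Pre_.
def generate_verification_command (analysis : List (String × List (Int × Int))) (model_path : String) : String :=
  let configs := ((PySem.Dict.mk analysis).get? "target_configs").getD []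
  if configs = [] then "# No target configs found"
  else
    let min_i := (PySem.List.min? (configs.map (fun c => c.1)) (fun y => y)).getD 0
    let max_j := (PySem.List.max? (configs.map (fun c => c.2)) (fun y => y)).getD 0
    "# Generation verification on " ++ PySem.Int.toStr (PySem.List.len configs) ++ " target configs" ++ "\n" ++
    "# Bounding box: i=[" ++ PySem.Int.toStr min_i ++ "," ++
      PySem.Int.toStr ((PySem.List.max? (configs.map (fun c => c.1)) (fun y => y)).getD 0) ++ "], j=[" ++
      PySem.Int.toStr ((PySem.List.min? (configs.map (fun c => c.2)) (fun y => y)).getD 0) ++ "," ++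
      PySem.Int.toStr max_j ++ "]" ++ "\n" ++
    "#" ++ "\n" ++
    "# Option 1: Run full generation probes on the interesting region" ++ "\n" ++
    "python scripts/run_sweep.py \\" ++ "\n" ++
    "  --model " ++ model_path ++ " \\" ++ "\n" ++
    "  --probes eq language spatial_pong_simple spatial_pong_strategic \\" ++ "\n" ++
    "  --mode duplicate \\" ++ "\n" ++
    "  --max-layers " ++ PySem.Int.toStr (max_j + 1) ++ " \\" ++ "\n" ++
    "  --output results/generation_verification" ++ "\n" ++
    "#" ++ "\n" ++
    "# Option 2: For targeted configs, use Python directly:" ++ "\n" ++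
    "# from scripts.analyze_logprob_sweep import load_targets" ++ "\n" ++
    "# configs = load_targets('results/targeted_configs.json')" ++ "\n"

-- ===== PORT B =====
def generate_verification_command_alt (analysis : List (String × List (Int × Int))) (model_path : String) : String :=
  let configs := ((PySem.Dict.mk analysis).get? "target_configs").getD []
  if configs = [] then "# No target configs found"
  else
    let si := PySem.List.sorted (configs.map (fun c => c.1)) (fun y => y) false
    let sj := PySem.List.sorted (configs.map (fun c => c.2)) (fun y => y) false
    let min_i := (PySem.List.pyGet? si 0).getD 0
    let max_i := (PySem.List.pyGet? si (-1)).getD 0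
    let min_j := (PySem.List.pyGet? sj 0).getD 0
    let max_j := (PySem.List.pyGet? sj (-1)).getD 0
    let lines : List String :=
      [ "# Generation verification on " ++ PySem.Int.toStr (PySem.List.len configs) ++ " target configs",
        "# Bounding box: i=[" ++ PySem.Int.toStr min_i ++ "," ++ PySem.Int.toStr max_i ++ "], j=[" ++
          PySem.Int.toStr min_j ++ "," ++ PySem.Int.toStr max_j ++ "]",
        "#",
        "# Option 1: Run full generation probes on the interesting region",
        "python scripts/run_sweep.py \\",
        "  --model " ++ model_path ++ " \\",
        "  --probes eq language spatial_pong_simple spatial_pong_strategic \\",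
        "  --mode duplicate \\",
        "  --max-layers " ++ PySem.Int.toStr (max_j + 1) ++ " \\",
        "  --output results/generation_verification",
        "#",
        "# Option 2: For targeted configs, use Python directly:",
        "# from scripts.analyze_logprob_sweep import load_targets",
        "# configs = load_targets('results/targeted_configs.json')",
        "" ]
    PySem.Str.join "\n" lines

-- ===== PRECONDITION & SPEC =====
-- Pre_ excludes exactly the inputs where Python A raises KeyError: analysis without a "target_configs" key.
def Pre_generate_verification_command (analysis : List (String × List (Int × Int))) (model_path : String) : Prop :=
  ((PySem.Dict.mk analysis).get? "target_configs").isSome = true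
instance (analysis : List (String × List (Int × Int))) (model_path : String) : Decidable (Pre_generate_verification_command analysis model_path) := by unfold Pre_generate_verification_command; infer_instance
def pvWitness_generate_verification_command : (List (String × List (Int × Int))) × String :=
  ([("target_configs", [(1, 2)])], "model")
def Spec_generate_verification_command (analysis : List (String × List (Int × Int))) (model_path : String) (out : String) : Prop := out = generate_verification_command_alt analysis model_path
instance (analysis : List (String × List (Int × Int))) (model_path : String) (out : String) : Decidable (Spec_generate_verification_command analysis model_path out) := by unfold Spec_generate_verification_command; infer_instance

-- ===== CLAIM =====
def Claim_equal_generate_verification_command : Prop := ∀ (analysis : List (String × List (Int × Int))) (model_path : String), Dom_generate_verification_command analysis model_path → Pre_generate_verification_command analysis model_path → Spec_generate_verification_command analysis model_path (generate_verification_command analysis model_path)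

-- ===== LEMMAS AND PROOFS =====

-- foldl min is a member of and a lower bound for a :: t
theorem foldl_min_spec (t : List Int) (a : Int) :
    t.foldl min a ∈ a :: t ∧ ∀ y ∈ a :: t, t.foldl min a ≤ y := by
  induction t generalizing a with
  | nil => exact ⟨List.mem_cons_self, by simp⟩
  | cons b t ih =>
    obtain ⟨hm, hb⟩ := ih (min a b)
    constructor
    · rcases List.mem_cons.mp hm with h | h
      · rcases min_choice a b with hc | hc
        · rw [List.foldl_cons, h, hc]; exact List.mem_cons_self
        · rw [List.foldl_cons, h, hc]; simp
      · rw [List.foldl_cons]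
        exact List.mem_cons_of_mem _ (List.mem_cons_of_mem _ h)
    · intro y hy
      rcases List.mem_cons.mp hy with rfl | hy'
      · exact le_trans (hb _ List.mem_cons_self) (min_le_left _ _)
      · rcases List.mem_cons.mp hy' with rfl | h
        · exact le_trans (hb _ List.mem_cons_self) (min_le_right _ _)
        · exact hb _ (List.mem_cons_of_mem _ h)

theorem foldl_max_spec (t : List Int) (a : Int) :
    t.foldl max a ∈ a :: t ∧ ∀ y ∈ a :: t, y ≤ t.foldl max a := by
  induction t generalizing a with
  | nil => exact ⟨List.mem_cons_self, by simp⟩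
  | cons b t ih =>
    obtain ⟨hm, hb⟩ := ih (max a b)
    constructor
    · rcases List.mem_cons.mp hm with h | h
      · rcases max_choice a b with hc | hc
        · rw [List.foldl_cons, h, hc]; exact List.mem_cons_self
        · rw [List.foldl_cons, h, hc]; simp
      · rw [List.foldl_cons]
        exact List.mem_cons_of_mem _ (List.mem_cons_of_mem _ h)
    · intro y hy
      rcases List.mem_cons.mp hy with rfl | hy'
      · exact le_trans (le_max_left _ _) (hb _ List.mem_cons_self)
      · rcases List.mem_cons.mp hy' with rfl | h
        · exact le_trans (le_max_right _ _) (hb _ List.mem_cons_self)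
        · exact hb _ (List.mem_cons_of_mem _ h)

-- in a ≤-sorted list every element is ≤ the last one
theorem pairwise_le_getLast? (l : List Int) (h : l.Pairwise (· ≤ ·)) :
    ∀ L, l.getLast? = some L → ∀ y ∈ l, y ≤ L := by
  induction l with
  | nil => intro L hL; simp at hL
  | cons a t ih =>
    intro L hL y hy
    cases t with
    | nil =>
      simp at hL hy; subst hL; subst hy; exact le_refl _
    | cons b t' =>
      rw [List.getLast?_cons_cons] at hL
      have hpair := List.pairwise_cons.mp h
      have hLmem : L ∈ b :: t' := List.mem_of_mem_getLast? (Option.mem_def.mpr hL)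
      rcases List.mem_cons.mp hy with rfl | hy' 
      · exact hpair.1 _ hLmem
      · exact ih hpair.2 L hL y hy'

-- head of sorted (a :: t) is foldl min
theorem sorted_head_eq (a : Int) (t : List Int) :
    (PySem.List.pyGet? (PySem.List.sorted (a :: t) (fun y => y) false) 0).getD 0 = t.foldl min a := by
  cases hs : PySem.List.sorted (a :: t) (fun y => y) false with
  | nil => exact absurd ((PySem.List.sorted_eq_nil_iff _ _ _).mp hs) (by simp)
  | cons m u =>
    rw [PySem.List.pyGet?_zero_cons]
    obtain ⟨hmem, hlb⟩ := foldl_min_spec t a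
    have hmmem : m ∈ a :: t := (PySem.List.mem_sorted _ _ _ m).mp (hs ▸ List.mem_cons_self)
    have h1 : m ≤ t.foldl min a := PySem.List.key_head_sorted_le _ _ hs _ hmem
    have h2 : t.foldl min a ≤ m := hlb _ hmmem
    simp only [Option.getD_some]
    exact le_antisymm h1 h2

-- last of sorted (a :: t) is foldl max
theorem sorted_last_eq (a : Int) (t : List Int) :
    (PySem.List.pyGet? (PySem.List.sorted (a :: t) (fun y => y) false) (-1)).getD 0 = t.foldl max a := by
  rw [PySem.List.pyGet?_neg_one]
  have hne : PySem.List.sorted (a :: t) (fun y => y) false ≠ [] := by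
    intro h; exact absurd ((PySem.List.sorted_eq_nil_iff _ _ _).mp h) (by simp)
  obtain ⟨L, hL⟩ := List.getLast?_isSome.mpr hne |> Option.isSome_iff_exists.mp
  rw [hL]
  have hpw : (PySem.List.sorted (a :: t) (fun y => y) false).Pairwise (· ≤ ·) := by
    simpa using PySem.List.sorted_pairwise (a :: t) (fun y : Int => y)
  obtain ⟨hmem, hub⟩ := foldl_max_spec t a
  have hLmem : L ∈ a :: t := (PySem.List.mem_sorted _ _ _ L).mp (List.mem_of_mem_getLast? (Option.mem_def.mpr hL))
  have h1 : t.foldl max a ≤ L := by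
    refine pairwise_le_getLast? _ hpw L hL _ ?_
    exact (PySem.List.mem_sorted _ _ _ (t.foldl max a)).mpr hmem
  have h2 : L ≤ t.foldl max a := hub _ hLmem
  simp only [Option.getD_some]
  exact le_antisymm h2 h1

theorem minFold_eq (c0 : Int × Int) (rest : List (Int × Int)) (f : Int × Int → Int) :
    (PySem.List.min? ((c0 :: rest).map f) (fun y => y)).getD 0 =
      (rest.map f).foldl min (f c0) := by
  simp [List.map_cons, PySem.List.min?_id_cons]

theorem maxFold_eq (c0 : Int × Int) (rest : List (Int × Int)) (f : Int × Int → Int) :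
    (PySem.List.max? ((c0 :: rest).map f) (fun y => y)).getD 0 =
      (rest.map f).foldl max (f c0) := by
  simp [List.map_cons, PySem.List.max?_id_cons]

theorem sortedHead_eq_min (c0 : Int × Int) (rest : List (Int × Int)) (f : Int × Int → Int) :
    (PySem.List.pyGet? (PySem.List.sorted ((c0 :: rest).map f) (fun y => y) false) 0).getD 0 =
      (rest.map f).foldl min (f c0) := by
  rw [List.map_cons, sorted_head_eq]

theorem sortedLast_eq_max (c0 : Int × Int) (rest : List (Int × Int)) (f : Int × Int → Int) :
    (PySem.List.pyGet? (PySem.List.sorted ((c0 :: rest).map f) (fun y => y) false) (-1)).getD 0 =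
      (rest.map f).foldl max (f c0) := by
  rw [List.map_cons, sorted_last_eq]

-- ===== VERDICT =====
set_option maxRecDepth 8192 in
theorem generate_verification_command_spec : Claim_equal_generate_verification_command := by
  intro analysis model_path _ _
  unfold Spec_generate_verification_command
  unfold generate_verification_command generate_verification_command_alt
  cases hc : ((PySem.Dict.mk analysis).get? "target_configs").getD [] with
  | nil => simp
  | cons c0 rest =>
    simp only [List.cons_ne_nil, if_false,
      minFold_eq c0 rest (fun c => c.1), maxFold_eq c0 rest (fun c => c.1),
      minFold_eq c0 rest (fun c => c.2), maxFold_eq c0 rest (fun c => c.2),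
      sortedHead_eq_min c0 rest (fun c => c.1), sortedLast_eq_max c0 rest (fun c => c.1),
      sortedHead_eq_min c0 rest (fun c => c.2), sortedLast_eq_max c0 rest (fun c => c.2)]
    apply String.toList_injective
    simp [PySem.Str.join, PySem.Chars.join, List.intercalate, List.intersperse]
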